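-- pv_equiv track=rewrite | github.com/KabirovElmurod/karno_karta | myapp/bool_math.py | str_to_bool
-- ===== SOURCE A (Python) =====
-- def str_to_bool(item):
--     find = False
--     for i in range(len(item)):
--         if item[i] == "'":
--             find = True
--             item = item[:i-1] + '(not ' + item[i-1] + ')' + item[i+1:]
--     if find == True:
--         return str_to_bool(item)
--     else:
--         return item
-- ===== SOURCE B (Python) =====
-- def str_to_bool(item):
--     # Split at apostrophes (C speed); each chunk boundary negates the last char of the chunk before it.
--     parts = item.split("'")
--     out = []
--     prev = parts[0]
--     for p in parts[1:]:
--         if prev: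
--             out.append(prev[:-1] + "(not " + prev[-1] + ")")
--         else:
--             out.append(prev)
--         prev = p
--     out.append(prev)
--     return "".join(out)
-- ===== Notes on version B (the rewrite author's own statement) =====
-- stated objective: faster
-- what changed: Replaces the repeated rescan-and-splice recursion (one full pass and a rebuilt string per apostrophe) by a single str.split at apostrophes plus one join, negating the last character of each chunk before a split point.
-- outside the precondition, e.g. on str_to_bool("'"): A returns '(not(not  ))', B returns ''; on str_to_bool("A''"): A returns '(not A(not ))', B returns '(not A)'; on str_to_bool("'A"): A does not finish within the time limit, B returns 'A'
import Mathlib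
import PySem

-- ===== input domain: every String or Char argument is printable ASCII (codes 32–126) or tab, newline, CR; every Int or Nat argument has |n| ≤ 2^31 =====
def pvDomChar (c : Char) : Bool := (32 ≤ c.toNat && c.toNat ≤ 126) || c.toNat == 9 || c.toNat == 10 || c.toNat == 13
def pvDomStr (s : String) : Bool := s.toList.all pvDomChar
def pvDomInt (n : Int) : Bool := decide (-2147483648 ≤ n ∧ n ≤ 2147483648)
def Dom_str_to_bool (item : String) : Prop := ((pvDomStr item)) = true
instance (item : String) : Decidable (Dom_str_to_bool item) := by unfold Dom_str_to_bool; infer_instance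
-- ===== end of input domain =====

-- B replaces A's repeated rescan-and-splice recursion by one left-to-right pass (objective: faster).

-- ===== PORT A =====
-- one iteration of Python's `for i in range(len(item))` body (the range bound is the ORIGINAL length;
-- the string is re-spliced in place, so later indices read the already-shifted string, as in Python)
def pvStepA (st : Bool × List Char) (i : Int) : Bool × List Char :=
  match PySem.List.pyGet? st.2 i with
  | some c =>
      if c = '\'' then
        match PySem.List.pyGet? st.2 (i - 1) with
        | some p =>
            (true,
             PySem.List.slice st.2 none (some (i - 1)) ++
               ('(' :: 'n' :: 'o' :: 't' :: ' ' :: [p]) ++ [')'] ++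
               PySem.List.slice st.2 (some (i + 1)) none)
        | none => st   -- IndexError: unreachable (the string never shrinks); totality guard only
      else st
  | none => st         -- IndexError: unreachable (i < original length ≤ current length); guard only

-- the tail recursion `if find: return str_to_bool(item)`, run with fuel; a recursive call happens
-- only after an apostrophe was consumed, so fuel = length + 1 suffices on every input Pre_ admits
def pvAuxA : Nat → List Char → List Char
  | 0, s => s
  | fuel + 1, s =>
      let r := (PySem.List.pyRange 0 (s.length : Int)).foldl pvStepA (false, s)
      if r.1 then pvAuxA fuel r.2 else r.2

def str_to_bool (item : String) : String :=
  String.mk (pvAuxA (item.toList.length + 1) item.toList)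

-- ===== PORT B =====
-- Source B: split at apostrophes, rewrite the tail of each chunk that precedes a split point, join
def pvWrapPrev (prev : List Char) : List Char :=
  match PySem.List.pyGet? prev (-1) with   -- prev[-1]; `none` exactly when `if prev:` is false
  | some c => PySem.List.slice prev none (some (-1)) ++
      ('(' :: 'n' :: 'o' :: 't' :: ' ' :: [c]) ++ [')']
  | none => prev

def str_to_bool_alt (item : String) : String :=
  match PySem.Chars.splitOn item.toList ['\''] with
  | [] => String.mk []        -- unreachable: str.split never returns an empty list
  | p0 :: rest =>
      let st := rest.foldl
        (fun (s : List (List Char) × List Char) p => (s.1 ++ [pvWrapPrev s.2], p)) ([], p0)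
      String.mk ((st.1 ++ [st.2]).flatten)

-- ===== PRECONDITION & SPEC =====
-- no two adjacent apostrophes anywhere in the list
def pvNoAdjQ : List Char → Bool
  | a :: b :: t => (!(a = '\'' && b = '\'')) && pvNoAdjQ (b :: t)
  | _ => true

-- Pre_ excludes strings that start with an apostrophe or contain two adjacent apostrophes: there A's
-- negative-index wraparound / stale-index splicing yields accidental values or infinite recursion.
def Pre_str_to_bool (item : String) : Prop :=
  item.toList.head? ≠ some '\'' ∧ pvNoAdjQ item.toList = true

instance (item : String) : Decidable (Pre_str_to_bool item) := by
  unfold Pre_str_to_bool; infer_instance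

def pvWitness_str_to_bool : String := "AB'+C'"

def Spec_str_to_bool (item : String) (out : String) : Prop := out = str_to_bool_alt item
instance (item : String) (out : String) : Decidable (Spec_str_to_bool item out) := by
  unfold Spec_str_to_bool; infer_instance

-- ===== CLAIM (what is proved, stated in full; the proofs are below) =====
def Claim_equal_str_to_bool : Prop :=
  ∀ (item : String), Dom_str_to_bool item → Pre_str_to_bool item →
    Spec_str_to_bool item (str_to_bool item)

-- ===== LEMMAS AND PROOFS =====

-- the common specification both ports are reduced to: one scan, each pair X' becomes (not X)
def pvExpand : List Char → List Char
  | [] => []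
  | [c] => [c]
  | c :: d :: t =>
      if d = '\'' then '(' :: 'n' :: 'o' :: 't' :: ' ' :: c :: ')' :: pvExpand t
      else c :: pvExpand (d :: t)

def pvNoQ (l : List Char) : Prop := ∀ c ∈ l, c ≠ '\''

def pvClean (l : List Char) : Prop := l.head? ≠ some '\'' ∧ pvNoAdjQ l = true

lemma pvNoAdjQ_suffix {a : Char} {l : List Char} (h : pvNoAdjQ (a :: l) = true) :
    pvNoAdjQ l = true := by
  cases l with
  | nil => rfl
  | cons b t => simp [pvNoAdjQ] at h ⊢; exact h.2

-- first-quote decomposition of a clean list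
lemma pvFirstQ : ∀ (l : List Char), pvNoAdjQ l = true → l.head? ≠ some '\'' →
    pvNoQ l ∨ ∃ u c v, l = u ++ c :: '\'' :: v ∧ pvNoQ u ∧ c ≠ '\'' ∧ pvClean v
  | [], _, _ => Or.inl (by intro c hc; simp at hc)
  | a :: t, hadj, hhead => by
    have ha : a ≠ '\'' := by simpa using hhead
    cases t with
    | nil =>
      refine Or.inl fun c hc => ?_
      simp at hc; subst hc; exact ha
    | cons b t' =>
      by_cases hb : b = '\''
      · subst hb
        refine Or.inr ⟨[], a, t', by simp, by intro c hc; simp at hc, ha, ?_,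
          pvNoAdjQ_suffix (pvNoAdjQ_suffix hadj)⟩
        cases t' with
        | nil => simp
        | cons x t2 =>
          have h2 : pvNoAdjQ ('\'' :: x :: t2) = true := pvNoAdjQ_suffix hadj
          simp [pvNoAdjQ] at h2
          simpa using h2.1
      · have hrec := pvFirstQ (b :: t') (pvNoAdjQ_suffix hadj) (by simpa using hb)
        rcases hrec with hno | ⟨u, c, v, heq, hu, hc, hv⟩
        · refine Or.inl fun c hc => ?_
          rcases List.mem_cons.mp hc with h | h
          · simpa [h] using ha
          · exact hno c h
        · refine Or.inr ⟨a :: u, c, v, by simp [heq], ?_, hc, hv⟩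
          intro x hx
          rcases List.mem_cons.mp hx with h | h
          · simpa [h] using ha
          · exact hu x h

lemma pvExpand_noQ : ∀ (l : List Char), pvNoQ l → pvExpand l = l
  | [], _ => rfl
  | [c], _ => rfl
  | c :: d :: t, h => by
    have hd : d ≠ '\'' := h d (by simp)
    have ht : pvNoQ (d :: t) := fun x hx => h x (List.mem_cons_of_mem c hx)
    simp [pvExpand, hd, pvExpand_noQ (d :: t) ht]

lemma pvExpand_append_noQ : ∀ (u v : List Char), pvNoQ u → v.head? ≠ some '\'' →
    pvExpand (u ++ v) = u ++ pvExpand v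
  | [], v, _, _ => by simp
  | [a], v, hu, hv => by
    cases v with
    | nil => simp [pvExpand]
    | cons b v' =>
      have hb : b ≠ '\'' := by simpa using hv
      simp [pvExpand, hb]
  | a :: b :: u', v, hu, hv => by
    have hb : b ≠ '\'' := hu b (by simp)
    have hu2 : pvNoQ (b :: u') := fun x hx => hu x (List.mem_cons_of_mem a hx)
    have hrec := pvExpand_append_noQ (b :: u') v hu2 hv
    simp only [List.cons_append] at hrec ⊢
    simp [pvExpand, hb, hrec]

lemma pvCount_noQ {l : List Char} (h : pvNoQ l) : l.count '\'' = 0 :=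
  List.count_eq_zero.mpr (fun hc => (h _ hc) rfl)

lemma pvNoAdjQ_append : ∀ (d t : List Char), pvNoQ d → pvNoAdjQ t = true →
    pvNoAdjQ (d ++ t) = true
  | [], t, _, ht => ht
  | [a], t, hd, ht => by
    cases t with
    | nil => rfl
    | cons b t' =>
      have ha : a ≠ '\'' := hd a (by simp)
      simp [pvNoAdjQ, ha, ht]
  | a :: b :: d', t, hd, ht => by
    have ha : a ≠ '\'' := hd a (by simp)
    have hrec := pvNoAdjQ_append (b :: d') t (fun x hx => hd x (List.mem_cons_of_mem a hx)) ht
    simp only [List.cons_append] at hrec ⊢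
    simp [pvNoAdjQ, ha, hrec]

lemma pvClean_append {d t : List Char} (hd : pvNoQ d) (ht : pvClean t) :
    pvClean (d ++ t) := by
  refine ⟨?_, pvNoAdjQ_append d t hd ht.2⟩
  cases d with
  | nil => simpa using ht.1
  | cons a d' => simpa using hd a (by simp)

-- the loop leaves the state unchanged over a range of indices that never reads an apostrophe
lemma pvSkipA (n : Nat) : ∀ (d i : Nat) (st : Bool × List Char), n ≤ i + d →
    (∀ m : Nat, i ≤ m → m < n → PySem.List.pyGet? st.2 (m : Int) ≠ some '\'') →
    (PySem.List.pyRange (i : Int) (n : Int)).foldl pvStepA st = st := by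
  intro d
  induction d with
  | zero =>
    intro i st hle _
    rw [PySem.List.pyRange_one_eq_nil (by exact_mod_cast hle)]
    rfl
  | succ d ih =>
    intro i st hle hread
    by_cases hin : i < n
    · rw [PySem.List.pyRange_one_cons (by exact_mod_cast hin)]
      have hstep : pvStepA st (i : Int) = st := by
        unfold pvStepA
        cases hg : PySem.List.pyGet? st.2 (i : Int) with
        | none => simp
        | some c =>
          have hcq : ¬ c = '\'' := by
            intro hc; exact hread i le_rfl hin (by rw [hg, hc])
          simp [hcq]
      rw [List.foldl_cons, hstep]
      have hcast : ((i : Int) + 1) = ((i + 1 : Nat) : Int) := by push_cast; ring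
      rw [hcast]
      exact ih (i + 1) st (by omega) (fun m hm hmn => hread m (by omega) hmn)
    · rw [PySem.List.pyRange_one_eq_nil (by exact_mod_cast Nat.le_of_not_lt hin)]
      rfl

lemma pvFirstq_unique : ∀ (u : List Char) {c : Char} {v : List Char} (u' : List Char)
    {c' : Char} {v' : List Char},
    u ++ c :: '\'' :: v = u' ++ c' :: '\'' :: v' →
    pvNoQ (u ++ [c]) → pvNoQ (u' ++ [c']) → u = u'
  | [], c, v, [], c', v', heq, _, _ => rfl
  | [], c, v, a :: u2, c', v', heq, h1, h2 => by
    simp only [List.nil_append, List.cons_append, List.cons.injEq] at heq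
    exfalso
    have hq : ('\'' : Char) ∈ a :: (u2 ++ [c']) := by
      have h3 := heq.2
      cases u2 with
      | nil =>
        simp only [List.nil_append, List.cons.injEq] at h3
        simp [h3.1.symm]
      | cons x u3 =>
        simp only [List.cons_append, List.cons.injEq] at h3
        simp [h3.1.symm]
    exact (h2 '\'' (by simpa using hq)) rfl
  | a :: u2, c, v, [], c', v', heq, h1, h2 =>
    absurd (pvFirstq_unique [] (a :: u2) heq.symm h2 h1).symm (by simp)
  | a :: u2, c, v, b :: u4, c', v', heq, h1, h2 => by
    simp only [List.cons_append, List.cons.injEq] at heq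
    have hrec := pvFirstq_unique u2 u4 heq.2
      (fun x hx => h1 x (List.mem_cons_of_mem a hx))
      (fun x hx => h2 x (List.mem_cons_of_mem b hx))
    simp [heq.1, hrec]

-- every read of a quote-free list never yields an apostrophe
lemma pvReadNoQ {l : List Char} (h : pvNoQ l) (m : Nat) :
    PySem.List.pyGet? l (m : Int) ≠ some '\'' := by
  rw [PySem.List.pyGet?_natCast]
  intro hg
  exact (h '\'' (List.mem_of_getElem? hg)) rfl

-- main loop invariant: the state is a quote-free processed part ++ a clean unprocessed suffix
lemma pvMainA : ∀ (N : Nat) (todo done : List Char) (find : Bool) (i n : Nat),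
    todo.length ≤ N →
    pvNoQ done → pvClean todo → i ≤ done.length →
    ∃ (f2 : Bool) (done2 todo2 : List Char),
      (PySem.List.pyRange (i : Int) (n : Int)).foldl pvStepA (find, done ++ todo)
        = (f2, done2 ++ todo2) ∧
      pvNoQ done2 ∧ pvClean todo2 ∧
      done2 ++ pvExpand todo2 = done ++ pvExpand todo ∧
      todo2.count '\'' ≤ todo.count '\'' ∧
      (find = true → f2 = true) ∧
      (∀ u c v, todo = u ++ c :: '\'' :: v → pvNoQ (u ++ [c]) →
        done.length + u.length + 1 < n →
        f2 = true ∧ todo2.count '\'' < todo.count '\'') := by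
  intro N
  induction N with
  | zero =>
    intro todo done find i n hlen hdone hclean hi
    have htodo : todo = [] := List.eq_nil_of_length_eq_zero (Nat.le_zero.mp hlen)
    subst htodo
    refine ⟨find, done, [], ?_, hdone, hclean, rfl, le_rfl, fun h => h, ?_⟩
    · rw [pvSkipA n n i (find, done ++ []) (by omega)]
      intro m _ _
      exact pvReadNoQ (by simpa using hdone) m
    · intro u c v heq
      exact absurd heq (by simp)
  | succ N ih =>
    intro todo done find i n hlen hdone hclean hi
    rcases pvFirstQ todo hclean.2 hclean.1 with hno | ⟨u, c, v, heq, hu, hc, hv⟩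
    · -- no apostrophe anywhere: the whole scan is a no-op
      refine ⟨find, done, todo, ?_, hdone, hclean, rfl, le_rfl, fun h => h, ?_⟩
      · rw [pvSkipA n n i (find, done ++ todo) (by omega)]
        intro m _ _
        refine pvReadNoQ ?_ m
        intro x hx
        rcases List.mem_append.mp hx with h | h
        · exact hdone x h
        · exact hno x h
      · intro u c v heq _ _
        exact absurd (hno '\'' (by simp [heq])) (fun h => h rfl)
    · -- first apostrophe of todo at offset u.length + 1
      subst heq
      set pre1 : List Char := done ++ u with hpre1
      have hpre1noQ : pvNoQ pre1 := by
        intro x hx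
        rcases List.mem_append.mp hx with h | h
        · exact hdone x h
        · exact hu x h
      set p : Nat := pre1.length + 1 with hp
      by_cases hvis : p < n
      · -- the apostrophe is inside the scanned range: it is spliced out, then the loop continues
        have hassoc : done ++ (u ++ c :: '\'' :: v) = (pre1 ++ [c]) ++ '\'' :: v := by
          simp [hpre1]
        have hip : i ≤ p := by
          have hdl : done.length ≤ pre1.length := by simp [hpre1]
          omega
        rw [PySem.List.pyRange_one_append (i : Int) (p : Int) (n : Int)
          (by exact_mod_cast hip) (by exact_mod_cast Nat.le_of_lt hvis), List.foldl_append]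
        rw [pvSkipA p p i (find, done ++ (u ++ c :: '\'' :: v)) (by omega) ?hread]
        case hread =>
          intro m _ hmp
          rw [hassoc]
          show PySem.List.pyGet? ((pre1 ++ [c]) ++ '\'' :: v) (m : Int) ≠ some '\''
          rw [PySem.List.pyGet?_natCast]
          have hmlt : m < (pre1 ++ [c]).length := by simp; omega
          rw [List.getElem?_append_left hmlt]
          intro hg
          have hmem : ('\'' : Char) ∈ pre1 ++ [c] := List.mem_of_getElem? hg
          rcases List.mem_append.mp hmem with h | h
          · exact (hpre1noQ _ h) rfl
          · simp at h; exact hc h.symm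
        rw [PySem.List.pyRange_one_cons (by exact_mod_cast hvis), List.foldl_cons]
        have hstep : pvStepA (find, done ++ (u ++ c :: '\'' :: v)) (p : Int)
            = (true, (done ++ u ++ ['(', 'n', 'o', 't', ' ', c, ')']) ++ v) := by
          unfold pvStepA
          simp only
          have hg1 : PySem.List.pyGet? (done ++ (u ++ c :: '\'' :: v)) (p : Int)
              = some '\'' := by
            rw [hassoc]
            rw [show (p : Int) = (((pre1 ++ [c]).length : Nat) : Int) by simp [hp]]
            exact PySem.List.pyGet?_append_length _ _ _
          rw [hg1]
          simp only
          have hg2 : PySem.List.pyGet? (done ++ (u ++ c :: '\'' :: v)) ((p : Int) - 1)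
              = some c := by
            rw [show (p : Int) - 1 = ((pre1.length : Nat) : Int) by simp [hp]]
            rw [show done ++ (u ++ c :: '\'' :: v) = (done ++ u) ++ c :: '\'' :: v by simp,
              hpre1]
            exact PySem.List.pyGet?_append_length _ _ _
          rw [hg2]
          have hs1 : PySem.List.slice (done ++ (u ++ c :: '\'' :: v)) none (some ((p : Int) - 1))
              = pre1 := by
            rw [show (p : Int) - 1 = ((pre1.length : Nat) : Int) by simp [hp],
              PySem.List.slice_to_natCast, hpre1]
            rw [show done ++ (u ++ c :: '\'' :: v) = (done ++ u) ++ c :: '\'' :: v by simp]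
            exact List.take_left
          have hs2 : PySem.List.slice (done ++ (u ++ c :: '\'' :: v)) (some ((p : Int) + 1)) none
              = v := by
            rw [show (p : Int) + 1 = (((p + 1 : Nat)) : Int) by push_cast; ring,
              PySem.List.slice_from_natCast]
            rw [show done ++ (u ++ c :: '\'' :: v) = (pre1 ++ [c, '\'']) ++ v by simp [hpre1],
              show p + 1 = (pre1 ++ [c, '\'']).length by simp [hp]]
            exact List.drop_left
          rw [hs1, hs2]
          simp [hpre1]
        rw [hstep]
        have hdone2noQ : pvNoQ (done ++ u ++ ['(', 'n', 'o', 't', ' ', c, ')']) := by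
          intro x hx
          rcases List.mem_append.mp hx with h | h
          · exact hpre1noQ x (by simpa [hpre1] using h)
          · simp at h
            rcases h with h | h | h | h | h | h | h <;> simp [h]
            exact hc
        have hlen2 : v.length ≤ N := by
          simp at hlen; omega
        have hi2 : p + 1 ≤ (done ++ u ++ ['(', 'n', 'o', 't', ' ', c, ')']).length := by
          simp [hp, hpre1]
          omega
        rw [show ((p : Int) + 1) = (((p + 1 : Nat)) : Int) by push_cast; ring]
        obtain ⟨f2, done2, todo2, hfold, hnoQ2, hclean2, hexp2, hcnt2, hfind2, _⟩ :=
          ih v (done ++ u ++ ['(', 'n', 'o', 't', ' ', c, ')']) true (p + 1) n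
            hlen2 hdone2noQ hv hi2
        refine ⟨f2, done2, todo2, hfold, hnoQ2, hclean2, ?_, ?_, fun _ => hfind2 rfl, ?_⟩
        · rw [hexp2]
          rw [show pvExpand (u ++ c :: '\'' :: v)
              = u ++ '(' :: 'n' :: 'o' :: 't' :: ' ' :: c :: ')' :: pvExpand v by
            rw [pvExpand_append_noQ u _ hu (by simpa using hc)]; simp [pvExpand]]
          simp
        · have hct : (u ++ c :: '\'' :: v).count '\'' = v.count '\'' + 1 := by
            simp [List.count_append, pvCount_noQ hu, hc]
          omega
        · intro u' c' v' _ _ _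
          refine ⟨hfind2 rfl, ?_⟩
          have hct : (u ++ c :: '\'' :: v).count '\'' = v.count '\'' + 1 := by
            simp [List.count_append, pvCount_noQ hu, hc]
          omega
      · -- the first apostrophe lies beyond the scan bound: the whole scan is a no-op
        refine ⟨find, done, u ++ c :: '\'' :: v, ?_, hdone, hclean, rfl, le_rfl,
          fun h => h, ?_⟩
        · rw [pvSkipA n n i (find, done ++ (u ++ c :: '\'' :: v)) (by omega)]
          intro m _ hmn
          rw [show done ++ (u ++ c :: '\'' :: v) = (pre1 ++ [c]) ++ '\'' :: v by simp [hpre1]]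
          rw [PySem.List.pyGet?_natCast]
          have hmlt : m < (pre1 ++ [c]).length := by simp; omega
          rw [List.getElem?_append_left hmlt]
          intro hg
          have hmem : ('\'' : Char) ∈ pre1 ++ [c] := List.mem_of_getElem? hg
          rcases List.mem_append.mp hmem with h | h
          · exact (hpre1noQ _ h) rfl
          · simp at h; exact hc h.symm
        · intro u' c' v' heq' hnoQ' hlt'
          exfalso
          have huu : u = u' := pvFirstq_unique u u' heq'
            (by intro x hx
                rcases List.mem_append.mp hx with h | h
                · exact hu x h
                · simp at h; simpa [h] using hc)
            hnoQ'
          have hul : u.length = u'.length := by rw [huu]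
          have hpp : p = done.length + u.length + 1 := by simp [hp, hpre1]
          omega

lemma pvPass_noQ (s : List Char) (h : pvNoQ s) :
    (PySem.List.pyRange 0 (s.length : Int)).foldl pvStepA (false, s) = (false, s) := by
  rw [show (0 : Int) = ((0 : Nat) : Int) by simp]
  exact pvSkipA s.length s.length 0 (false, s) (by omega) (fun m _ _ => pvReadNoQ h m)

lemma pvAuxA_correct : ∀ (k : Nat) (s : List Char), pvClean s → s.count '\'' < k →
    pvAuxA k s = pvExpand s := by
  intro k
  induction k with
  | zero => intro s _ h; omega
  | succ k ih =>
    intro s hclean hcnt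
    rcases pvFirstQ s hclean.2 hclean.1 with hno | ⟨u, c, v, heq, hu, hc, hv⟩
    · simp only [pvAuxA, pvPass_noQ s hno]
      exact (pvExpand_noQ s hno).symm
    · have hvis : ([] : List Char).length + u.length + 1 < s.length := by
        rw [heq]
        simp only [List.length_nil, List.length_append, List.length_cons]
        omega
      obtain ⟨f2, done2, todo2, hfold, hnoQ2, hclean2, hexp2, _, _, hlast⟩ :=
        pvMainA s.length s [] false 0 s.length le_rfl (by intro x hx; simp at hx)
          hclean (by simp)
      obtain ⟨hf2, hcntlt⟩ := hlast u c v heq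
        (by intro x hx
            rcases List.mem_append.mp hx with h | h
            · exact hu x h
            · simp at h; simpa [h] using hc)
        hvis
      simp only [List.nil_append] at hfold hexp2
      rw [Nat.cast_zero] at hfold
      simp only [pvAuxA, hfold, hf2, if_true]
      have hclean3 : pvClean (done2 ++ todo2) := pvClean_append hnoQ2 hclean2
      have hcnt3 : (done2 ++ todo2).count '\'' < k := by
        have h1 : (done2 ++ todo2).count '\'' = todo2.count '\'' := by
          simp [List.count_append, pvCount_noQ hnoQ2]
        omega
      rw [ih (done2 ++ todo2) hclean3 hcnt3]
      rw [pvExpand_append_noQ done2 todo2 hnoQ2 hclean2.1, hexp2]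

-- B-side: the split-fold-join computes pvExpand on every clean string

lemma pvGoAcc : ∀ (fuel : Nat) (l cur : List Char) (acc : List (List Char)),
    PySem.Chars.splitOn.go ['\''] fuel l cur acc
      = acc.reverse ++ PySem.Chars.splitOn.go ['\''] fuel l cur [] := by
  intro fuel
  induction fuel with
  | zero => intro l cur acc; simp [PySem.Chars.splitOn.go]
  | succ f ih =>
    intro l cur acc
    cases l with
    | nil => simp [PySem.Chars.splitOn.go]
    | cons c rest =>
      by_cases hc : c = '\''
      · subst hc
        simp only [PySem.Chars.splitOn.go, List.isPrefixOf, BEq.rfl, Bool.true_and,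
          if_true, List.length_cons, List.length_nil]
        rw [ih _ _ (cur.reverse :: acc), ih _ _ [cur.reverse]]
        simp
      · have : (['\''].isPrefixOf (c :: rest)) = false := by
          simp [List.isPrefixOf]; exact fun h => absurd h.symm hc
        simp only [PySem.Chars.splitOn.go, this, Bool.false_eq_true, if_false]
        exact ih rest (c :: cur) acc

lemma pvGo_ne_nil : ∀ (fuel : Nat) (l cur : List Char) (acc : List (List Char)),
    PySem.Chars.splitOn.go ['\''] fuel l cur acc ≠ [] := by
  intro fuel
  induction fuel with
  | zero => intro l cur acc; simp [PySem.Chars.splitOn.go]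
  | succ f ih =>
    intro l cur acc
    cases l with
    | nil => simp [PySem.Chars.splitOn.go]
    | cons c rest =>
      by_cases hc : c = '\''
      · subst hc
        simp only [PySem.Chars.splitOn.go, List.isPrefixOf, BEq.rfl, Bool.true_and,
          if_true]
        exact ih _ _ _
      · have : (['\''].isPrefixOf (c :: rest)) = false := by
          simp [List.isPrefixOf]; exact fun h => absurd h.symm hc
        simp only [PySem.Chars.splitOn.go, this, Bool.false_eq_true, if_false]
        exact ih _ _ _

lemma pvGo_noQ : ∀ (w : List Char) (fuel : Nat) (cur : List Char) (acc : List (List Char)),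
    pvNoQ w → w.length ≤ fuel →
    PySem.Chars.splitOn.go ['\''] fuel w cur acc = ((cur.reverse ++ w) :: acc).reverse
  | [], fuel, cur, acc, _, _ => by
    cases fuel <;> simp [PySem.Chars.splitOn.go]
  | c :: w', fuel, cur, acc, hw, hlen => by
    cases fuel with
    | zero => simp at hlen
    | succ f =>
      have hc : c ≠ '\'' := hw c (by simp)
      have : (['\''].isPrefixOf (c :: w')) = false := by
        simp [List.isPrefixOf]; exact fun h => absurd h.symm hc
      simp only [PySem.Chars.splitOn.go, this, Bool.false_eq_true, if_false]
      rw [pvGo_noQ w' f (c :: cur) acc (fun x hx => hw x (List.mem_cons_of_mem c hx))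
        (by simp at hlen ⊢; omega)]
      simp

lemma pvGo_quote : ∀ (w : List Char) (fuel : Nat) (v cur : List Char) (acc : List (List Char)),
    pvNoQ w → w.length < fuel →
    PySem.Chars.splitOn.go ['\''] fuel (w ++ '\'' :: v) cur acc
      = PySem.Chars.splitOn.go ['\''] (fuel - (w.length + 1)) v [] ((cur.reverse ++ w) :: acc)
  | [], fuel, v, cur, acc, _, hlen => by
    cases fuel with
    | zero => simp at hlen
    | succ f =>
      simp only [List.nil_append, PySem.Chars.splitOn.go, List.isPrefixOf, BEq.rfl,
        Bool.true_and, if_true]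
      simp
  | c :: w', fuel, v, cur, acc, hw, hlen => by
    cases fuel with
    | zero => simp at hlen
    | succ f =>
      have hc : c ≠ '\'' := hw c (by simp)
      have hpre : (['\''].isPrefixOf (c :: (w' ++ '\'' :: v))) = false := by
        simp [List.isPrefixOf]; exact fun h => absurd h.symm hc
      simp only [List.cons_append, PySem.Chars.splitOn.go, hpre, Bool.false_eq_true, if_false]
      rw [pvGo_quote w' f v (c :: cur) acc (fun x hx => hw x (List.mem_cons_of_mem c hx))
        (by simp at hlen ⊢; omega)]
      rw [show (c :: cur).reverse ++ w' = cur.reverse ++ c :: w' by simp]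
      rw [show f - (w'.length + 1) = f + 1 - ((c :: w').length + 1) by
        simp only [List.length_cons]; omega]

lemma pvSplitOn_noQ (l : List Char) (h : pvNoQ l) :
    PySem.Chars.splitOn l ['\''] = [l] := by
  unfold PySem.Chars.splitOn
  rw [pvGo_noQ l (l.length + 1) [] [] h (by omega)]
  simp

lemma pvSplitOn_quote (w v : List Char) (h : pvNoQ w) :
    PySem.Chars.splitOn (w ++ '\'' :: v) ['\''] = w :: PySem.Chars.splitOn v ['\''] := by
  unfold PySem.Chars.splitOn
  rw [pvGo_quote w ((w ++ '\'' :: v).length + 1) v [] [] h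
    (by simp only [List.length_append, List.length_cons]; omega)]
  rw [show (w ++ '\'' :: v).length + 1 - (w.length + 1) = v.length + 1 by
    simp only [List.length_append, List.length_cons]; omega]
  rw [pvGoAcc]
  simp

-- the recursion the fold in str_to_bool_alt performs over the chunks
def pvGRec : List Char → List (List Char) → List Char
  | p0, [] => p0
  | p0, p :: ps => pvWrapPrev p0 ++ pvGRec p ps

lemma pvFold_flatten : ∀ (rest : List (List Char)) (acc : List (List Char)) (p0 : List Char),
    ((rest.foldl (fun (s : List (List Char) × List Char) p => (s.1 ++ [pvWrapPrev s.2], p))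
        (acc, p0)).1 ++
      [(rest.foldl (fun (s : List (List Char) × List Char) p => (s.1 ++ [pvWrapPrev s.2], p))
        (acc, p0)).2]).flatten
      = acc.flatten ++ pvGRec p0 rest
  | [], acc, p0 => by simp [pvGRec]
  | p :: ps, acc, p0 => by
    simp only [List.foldl_cons, pvGRec]
    rw [pvFold_flatten ps (acc ++ [pvWrapPrev p0]) p]
    simp

lemma pvWrap_concat (u : List Char) (c : Char) :
    pvWrapPrev (u ++ [c]) = u ++ ['(', 'n', 'o', 't', ' ', c, ')'] := by
  unfold pvWrapPrev
  rw [PySem.List.pyGet?_neg_one_append_singleton]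
  rw [show PySem.List.slice (u ++ [c]) none (some (-1)) = (u ++ [c]).dropLast from
    PySem.List.slice_to_neg_one _]
  simp

lemma pvGRec_expand : ∀ (N : Nat) (l : List Char), l.length ≤ N → pvClean l →
    (match PySem.Chars.splitOn l ['\''] with
     | [] => ([] : List Char)
     | p0 :: rest => pvGRec p0 rest) = pvExpand l := by
  intro N
  induction N with
  | zero =>
    intro l hlen hclean
    have : l = [] := List.eq_nil_of_length_eq_zero (Nat.le_zero.mp hlen)
    subst this
    rw [pvSplitOn_noQ [] (by intro x hx; simp at hx)]
    rfl
  | succ N ih =>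
    intro l hlen hclean
    rcases pvFirstQ l hclean.2 hclean.1 with hno | ⟨u, c, v, heq, hu, hc, hv⟩
    · rw [pvSplitOn_noQ l hno]
      exact (pvExpand_noQ l hno).symm
    · subst heq
      have hw : pvNoQ (u ++ [c]) := by
        intro x hx
        rcases List.mem_append.mp hx with h | h
        · exact hu x h
        · simp at h; simpa [h] using hc
      rw [show u ++ c :: '\'' :: v = (u ++ [c]) ++ '\'' :: v by simp]
      rw [pvSplitOn_quote (u ++ [c]) v hw]
      cases hsv : PySem.Chars.splitOn v ['\''] with
      | nil => exact absurd hsv (pvGo_ne_nil _ _ _ _)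
      | cons p0 rest =>
        have hvlen : v.length ≤ N := by simp at hlen; omega
        have hrec := ih v hvlen hv
        rw [hsv] at hrec
        simp only [pvGRec, hrec, pvWrap_concat]
        rw [show (u ++ [c]) ++ '\'' :: v = u ++ c :: '\'' :: v by simp]
        rw [pvExpand_append_noQ u _ hu (by simpa using hc)]
        simp [pvExpand]

lemma pvAlt_eq (item : String) :
    pvClean item.toList → str_to_bool_alt item = String.mk (pvExpand item.toList) := by
  intro hclean
  unfold str_to_bool_alt
  cases hsp : PySem.Chars.splitOn item.toList ['\''] with
  | nil => exact absurd hsp (pvGo_ne_nil _ _ _ _)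
  | cons p0 rest =>
    simp only
    rw [pvFold_flatten rest [] p0]
    have := pvGRec_expand item.toList.length item.toList le_rfl hclean
    rw [hsp] at this
    simp only [List.flatten_nil, List.nil_append, this]

-- ===== VERDICT (by name: the statement is the Claim_ definition above) =====
theorem str_to_bool_spec : Claim_equal_str_to_bool := by
  intro item _ hpre
  unfold Spec_str_to_bool str_to_bool
  have hclean : pvClean item.toList := ⟨hpre.1, hpre.2⟩
  rw [pvAuxA_correct (item.toList.length + 1) item.toList hclean
    (Nat.lt_succ_of_le List.count_le_length)]
  exact (pvAlt_eq item hclean).symm
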